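-- pv_equiv track=rewrite | github.com/siddartha19/OpenSales | backend/app/services/email_verification.py | generate_email_from_pattern
-- ===== SOURCE A (Python) =====
-- from typing import Optional
--
-- PATTERNS = [
--     ("firstname.lastname", lambda f, l, fi: f"{f}.{l}"),
--     ("firstname",          lambda f, l, fi: f"{f}"),
--     ("firstnamelastname",  lambda f, l, fi: f"{f}{l}"),
--     ("f.lastname",         lambda f, l, fi: f"{fi}.{l}"),
--     ("flastname",          lambda f, l, fi: f"{fi}{l}"),
--     ("firstname-lastname", lambda f, l, fi: f"{f}-{l}"),
--     ("firstname_lastname", lambda f, l, fi: f"{f}_{l}"),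
--     ("lastname.firstname", lambda f, l, fi: f"{l}.{f}"),
-- ]
--
-- def _clean(name: str) -> str:
--     """Lowercase, strip, keep only alpha chars."""
--     return "".join(c for c in name.lower().strip() if c.isalpha())
--
-- def generate_email_from_pattern(
--     first_name: str,
--     last_name: str,
--     domain: str,
--     pattern: str,
-- ) -> Optional[str]:
--     """Given a pattern name, reconstruct the email for any person at that domain."""
--     first = _clean(first_name)
--     last = _clean(last_name)
--     first_initial = first[0] if first else ""
--
--     mapping = {name: builder for name, builder in PATTERNS}
--     builder = mapping.get(pattern)
--     if not builder:
--         return None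
--     return f"{builder(first, last, first_initial)}@{domain}"
-- ===== SOURCE B (Python) =====
-- from typing import Optional
--
-- VALID_PATTERNS = (
--     "firstname.lastname", "firstname", "firstnamelastname", "f.lastname",
--     "flastname", "firstname-lastname", "firstname_lastname", "lastname.firstname",
-- )
--
--
-- def _clean(name: str) -> str:
--     """Lowercase, strip, keep only alpha chars."""
--     return "".join(c for c in name.lower().strip() if c.isalpha())
--
--
-- def generate_email_from_pattern(
--     first_name: str,
--     last_name: str,
--     domain: str,
--     pattern: str,
-- ) -> Optional[str]:
--     if pattern not in VALID_PATTERNS: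
--         return None
--     first = _clean(first_name)
--     last = _clean(last_name)
--     first_initial = first[:1]
--     # Rewrite the pattern name itself into a template, then substitute:
--     # "firstname" -> {0}, "lastname" -> {1}, the remaining bare "f" -> {2}.
--     template = (pattern.replace("firstname", "{0}")
--                        .replace("lastname", "{1}")
--                        .replace("f", "{2}"))
--     return f"{template.format(first, last, first_initial)}@{domain}"
-- ===== Notes on version B (the rewrite author's own statement) =====
-- stated objective: alternative
-- what changed: A dispatches among eight builder lambdas via a dict constructed on every call; B has a single generic path: it validates the pattern name first, rewrites the pattern string itself into a template (firstname->{0}, lastname->{1}, bare f->{2}) by textual replacement, and substitutes the cleaned names into it.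
import Mathlib
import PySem

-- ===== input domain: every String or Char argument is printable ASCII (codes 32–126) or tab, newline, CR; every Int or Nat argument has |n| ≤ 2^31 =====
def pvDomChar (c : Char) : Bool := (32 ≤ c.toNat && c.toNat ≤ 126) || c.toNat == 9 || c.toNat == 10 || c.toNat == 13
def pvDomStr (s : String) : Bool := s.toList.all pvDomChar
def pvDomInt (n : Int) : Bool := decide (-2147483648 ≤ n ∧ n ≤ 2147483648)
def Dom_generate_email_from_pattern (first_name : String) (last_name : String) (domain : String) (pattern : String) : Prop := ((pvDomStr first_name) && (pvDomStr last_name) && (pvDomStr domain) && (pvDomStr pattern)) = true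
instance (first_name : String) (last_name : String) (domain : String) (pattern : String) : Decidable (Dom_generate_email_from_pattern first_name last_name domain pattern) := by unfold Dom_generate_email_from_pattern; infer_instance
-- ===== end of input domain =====

-- B replaces A's table of eight builder lambdas + dict dispatch by a single generic path:
-- after validating the pattern name, it rewrites the pattern string itself into a template
-- ("firstname"->{0}, "lastname"->{1}, bare "f"->{2}) and substitutes (objective: alternative).

-- ===== PORT A =====
-- _clean: "".join(c for c in name.lower().strip() if c.isalpha())
def pvClean (name : String) : String :=
  String.ofList ((PySem.Chars.strip (PySem.Chars.lower name.toList)).filter PySem.Chars.isalpha)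

-- the module-level PATTERNS list of (name, builder) pairs
def pvPATTERNS : List (String × (String → String → String → String)) :=
  [ ("firstname.lastname", fun f l _fi => f ++ "." ++ l)
  , ("firstname",          fun f _l _fi => f)
  , ("firstnamelastname",  fun f l _fi => f ++ l)
  , ("f.lastname",         fun _f l fi => fi ++ "." ++ l)
  , ("flastname",          fun _f l fi => fi ++ l)
  , ("firstname-lastname", fun f l _fi => f ++ "-" ++ l)
  , ("firstname_lastname", fun f l _fi => f ++ "_" ++ l)
  , ("lastname.firstname", fun f l _fi => l ++ "." ++ f) ]

def generate_email_from_pattern (first_name : String) (last_name : String) (domain : String) (pattern : String) : Option String :=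
  let first := pvClean first_name
  let last := pvClean last_name
  let first_initial := match first.toList with
    | [] => ""
    | c :: _ => String.ofList [c]
  let mapping : PySem.Dict String (String → String → String → String) :=
    pvPATTERNS.foldl (fun d p => d.insert p.1 p.2) PySem.Dict.empty
  match mapping.get? pattern with
  | none => none
  | some builder => some (builder first last first_initial ++ "@" ++ domain)

-- ===== PORT B =====
-- the module-level VALID_PATTERNS tuple
def pvVALID : List String :=
  [ "firstname.lastname", "firstname", "firstnamelastname", "f.lastname"
  , "flastname", "firstname-lastname", "firstname_lastname", "lastname.firstname" ]

-- hand port of template.format(first, last, first_initial): scans the template and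
-- substitutes {0}/{1}/{2}; exact for the templates B produces (no other braces occur there)
def pvFmt : List Char → String → String → String → String
  | [], _, _, _ => ""
  | '{' :: '0' :: '}' :: rest, f, l, i => f ++ pvFmt rest f l i
  | '{' :: '1' :: '}' :: rest, f, l, i => l ++ pvFmt rest f l i
  | '{' :: '2' :: '}' :: rest, f, l, i => i ++ pvFmt rest f l i
  | c :: rest, f, l, i => String.ofList [c] ++ pvFmt rest f l i

def generate_email_from_pattern_alt (first_name : String) (last_name : String) (domain : String) (pattern : String) : Option String :=
  if ¬ (pvVALID.contains pattern) then none
  else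
    let first := pvClean first_name
    let last := pvClean last_name
    -- first[:1] : PySem.Chars.slice of the cleaned name's chars
    let first_initial := String.ofList (PySem.Chars.slice first.toList none (some 1) )
    let template := PySem.Str.replace (PySem.Str.replace (PySem.Str.replace pattern "firstname" "{0}") "lastname" "{1}") "f" "{2}"
    some (pvFmt template.toList first last first_initial ++ "@" ++ domain)

-- ===== PRECONDITION & SPEC =====
def Spec_generate_email_from_pattern (first_name : String) (last_name : String) (domain : String) (pattern : String) (out : Option String) : Prop := out = generate_email_from_pattern_alt first_name last_name domain pattern
instance (first_name : String) (last_name : String) (domain : String) (pattern : String) (out : Option String) : Decidable (Spec_generate_email_from_pattern first_name last_name domain pattern out) := by unfold Spec_generate_email_from_pattern; infer_instance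

-- ===== CLAIM (what is proved, stated in full; the proofs are below) =====
def Claim_equal_generate_email_from_pattern : Prop := ∀ (first_name : String) (last_name : String) (domain : String) (pattern : String), Dom_generate_email_from_pattern first_name last_name domain pattern → Spec_generate_email_from_pattern first_name last_name domain pattern (generate_email_from_pattern first_name last_name domain pattern)

-- ===== LEMMAS AND PROOFS =====
-- first[0] if first else ""  coincides with first[:1]
theorem pvInit_eq (cs : List Char) : (match cs with | [] => "" | c :: _ => String.ofList [c]) = String.ofList (PySem.Chars.slice cs none (some 1)) := by
  cases cs with
  | nil => rfl
  | cons c rest =>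
      simp [PySem.Chars.slice_eq_listSlice, PySem.List.slice_to (xs := c :: rest) (b := 1) (by norm_num)]

-- A's mapping dict, built by folding insert over PATTERNS, is the PATTERNS association list
theorem pvMapping_eq :
    (pvPATTERNS.foldl (fun d p => d.insert p.1 p.2) PySem.Dict.empty
      : PySem.Dict String (String → String → String → String)) = PySem.Dict.mk pvPATTERNS := rfl

-- ===== VERDICT (by name: the statement is the Claim_ definition above) =====
theorem generate_email_from_pattern_spec : Claim_equal_generate_email_from_pattern := by
  intro first_name last_name domain pattern _
  unfold Spec_generate_email_from_pattern
  by_cases h1 : pattern = "firstname.lastname"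
  · subst h1
    unfold generate_email_from_pattern generate_email_from_pattern_alt
    simp only [pvMapping_eq, ← pvInit_eq,
      show PySem.Str.replace (PySem.Str.replace (PySem.Str.replace "firstname.lastname" "firstname" "{0}") "lastname" "{1}") "f" "{2}" = "{0}.{1}" from rfl]
    simp [pvPATTERNS, pvVALID, PySem.Dict.get?_mk_cons, pvFmt, String.append_assoc]
  by_cases h2 : pattern = "firstname"
  · subst h2
    unfold generate_email_from_pattern generate_email_from_pattern_alt
    simp only [pvMapping_eq, ← pvInit_eq,
      show PySem.Str.replace (PySem.Str.replace (PySem.Str.replace "firstname" "firstname" "{0}") "lastname" "{1}") "f" "{2}" = "{0}" from rfl]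
    simp [pvPATTERNS, pvVALID, PySem.Dict.get?_mk_cons, pvFmt, String.append_assoc]
  by_cases h3 : pattern = "firstnamelastname"
  · subst h3
    unfold generate_email_from_pattern generate_email_from_pattern_alt
    simp only [pvMapping_eq, ← pvInit_eq,
      show PySem.Str.replace (PySem.Str.replace (PySem.Str.replace "firstnamelastname" "firstname" "{0}") "lastname" "{1}") "f" "{2}" = "{0}{1}" from rfl]
    simp [pvPATTERNS, pvVALID, PySem.Dict.get?_mk_cons, pvFmt, String.append_assoc]
  by_cases h4 : pattern = "f.lastname"
  · subst h4
    unfold generate_email_from_pattern generate_email_from_pattern_alt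
    simp only [pvMapping_eq, ← pvInit_eq,
      show PySem.Str.replace (PySem.Str.replace (PySem.Str.replace "f.lastname" "firstname" "{0}") "lastname" "{1}") "f" "{2}" = "{2}.{1}" from rfl]
    simp [pvPATTERNS, pvVALID, PySem.Dict.get?_mk_cons, pvFmt, String.append_assoc]
  by_cases h5 : pattern = "flastname"
  · subst h5
    unfold generate_email_from_pattern generate_email_from_pattern_alt
    simp only [pvMapping_eq, ← pvInit_eq,
      show PySem.Str.replace (PySem.Str.replace (PySem.Str.replace "flastname" "firstname" "{0}") "lastname" "{1}") "f" "{2}" = "{2}{1}" from rfl]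
    simp [pvPATTERNS, pvVALID, PySem.Dict.get?_mk_cons, pvFmt, String.append_assoc]
  by_cases h6 : pattern = "firstname-lastname"
  · subst h6
    unfold generate_email_from_pattern generate_email_from_pattern_alt
    simp only [pvMapping_eq, ← pvInit_eq,
      show PySem.Str.replace (PySem.Str.replace (PySem.Str.replace "firstname-lastname" "firstname" "{0}") "lastname" "{1}") "f" "{2}" = "{0}-{1}" from rfl]
    simp [pvPATTERNS, pvVALID, PySem.Dict.get?_mk_cons, pvFmt, String.append_assoc]
  by_cases h7 : pattern = "firstname_lastname"
  · subst h7
    unfold generate_email_from_pattern generate_email_from_pattern_alt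
    simp only [pvMapping_eq, ← pvInit_eq,
      show PySem.Str.replace (PySem.Str.replace (PySem.Str.replace "firstname_lastname" "firstname" "{0}") "lastname" "{1}") "f" "{2}" = "{0}_{1}" from rfl]
    simp [pvPATTERNS, pvVALID, PySem.Dict.get?_mk_cons, pvFmt, String.append_assoc]
  by_cases h8 : pattern = "lastname.firstname"
  · subst h8
    unfold generate_email_from_pattern generate_email_from_pattern_alt
    simp only [pvMapping_eq, ← pvInit_eq,
      show PySem.Str.replace (PySem.Str.replace (PySem.Str.replace "lastname.firstname" "firstname" "{0}") "lastname" "{1}") "f" "{2}" = "{1}.{0}" from rfl]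
    simp [pvPATTERNS, pvVALID, PySem.Dict.get?_mk_cons, pvFmt, String.append_assoc]
  · unfold generate_email_from_pattern generate_email_from_pattern_alt
    simp only [pvMapping_eq]
    simp [pvPATTERNS, pvVALID, PySem.Dict.get?, h1, Ne.symm h1, h2, Ne.symm h2, h3, Ne.symm h3, h4, Ne.symm h4, h5, Ne.symm h5, h6, Ne.symm h6, h7, Ne.symm h7, h8, Ne.symm h8]
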